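-- pv_equiv track=rewrite | github.com/Minggshen/storage_web_platform_3 | backend/services/solver_execution_service.py | _health_status_level
-- ===== SOURCE A (Python) =====
-- from typing import Any, Dict, Iterable, List, Optional, Tuple
--
-- def _health_status_level(
--
--     raw_status: Any,
--     issues: List[Dict[str, Any]],
--     summary: Dict[str, Any],
-- ) -> str:
--     text = str(raw_status or "").strip().lower()
--     if text in {"critical", "failed", "error"}:
--         return "critical"
--     if text in {"warning", "passed"}:
--         return text
--     if any(item.get("level") == "critical" for item in issues) or int(summary.get("error_count") or 0) > 0:
--         return "critical"
--     if any(item.get("level") == "warning" for item in issues) or int(summary.get("warning_count") or 0) > 0: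
--         return "warning"
--     return "passed"
-- ===== SOURCE B (Python) =====
-- LEVELS = ("passed", "warning", "critical")
--
-- _TEXT_RANK = {"critical": 2, "failed": 2, "error": 2, "warning": 1, "passed": 0}
--
--
-- def _issue_rank(item):
--     lv = item.get("level")
--     return 2 if lv == "critical" else 1 if lv == "warning" else 0
--
--
-- def _health_status_level(raw_status, issues, summary):
--     text = str(raw_status or "").strip().lower()
--     sev = _TEXT_RANK.get(text)
--     if sev is None:
--         sev = max(map(_issue_rank, issues), default=0)
--         if sev < 2 and int(summary.get("error_count") or 0) > 0:
--             sev = 2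
--         if sev < 1 and int(summary.get("warning_count") or 0) > 0:
--             sev = 1
--     return LEVELS[sev]
-- ===== Notes on version B (the rewrite author's own statement) =====
-- stated objective: alternative
-- what changed: B computes a single numeric severity (0/1/2): one rank table for the status text, max of per-issue ranks, counter-guarded escalation steps that preserve A's short-circuiting of the int() conversions, and a final index into a levels tuple, replacing A's ordered cascade of boolean early-return branches.
import Mathlib
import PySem

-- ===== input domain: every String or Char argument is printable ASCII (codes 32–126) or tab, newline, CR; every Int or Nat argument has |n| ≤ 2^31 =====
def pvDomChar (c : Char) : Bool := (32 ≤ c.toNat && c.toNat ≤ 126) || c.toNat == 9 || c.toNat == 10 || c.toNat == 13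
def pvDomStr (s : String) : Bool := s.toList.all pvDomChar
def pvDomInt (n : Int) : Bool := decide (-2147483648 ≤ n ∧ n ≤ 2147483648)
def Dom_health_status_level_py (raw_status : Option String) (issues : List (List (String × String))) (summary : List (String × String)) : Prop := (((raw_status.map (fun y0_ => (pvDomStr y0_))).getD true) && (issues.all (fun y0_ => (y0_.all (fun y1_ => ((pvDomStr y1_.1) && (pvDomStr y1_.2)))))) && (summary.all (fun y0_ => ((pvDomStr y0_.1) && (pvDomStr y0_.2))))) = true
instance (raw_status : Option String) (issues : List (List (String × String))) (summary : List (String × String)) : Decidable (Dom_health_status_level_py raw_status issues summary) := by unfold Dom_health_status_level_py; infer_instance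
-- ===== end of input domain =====

-- B replaces A's ordered cascade of boolean early-return branches by a numeric severity
-- lattice: rank the text, take the max of per-issue ranks, escalate by the counters with
-- guards preserving A's short-circuit of int(), and index a levels tuple (objective: alternative).

-- shared primitive helpers (Python dict.get on an assoc list; ``int(x or 0)`` on a .get result)
def pvLookup (d : List (String × String)) (k : String) : Option String :=
  (d.find? (fun p => p.1 == k)).map (·.2)

-- value of int(o or 0); the .getD 0 is only reached outside Pre_
def pvCount (o : Option String) : Int :=
  match o with
  | none => 0
  | some s => if s = "" then 0 else (PySem.Int.ofStr? s).getD 0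

-- true exactly where Python's int(o or 0) does not raise ValueError
def pvCountOK (o : Option String) : Bool :=
  match o with
  | none => true
  | some s => s == "" || (PySem.Int.ofStr? s).isSome

-- ===== PORT A =====
def health_status_level_py (raw_status : Option String) (issues : List (List (String × String))) (summary : List (String × String)) : String :=
  let text := PySem.Str.lower (PySem.Str.strip (raw_status.getD ""))
  if text = "critical" ∨ text = "failed" ∨ text = "error" then "critical"
  else if text = "warning" ∨ text = "passed" then text
  else if issues.any (fun item => pvLookup item "level" == some "critical")
          || decide (pvCount (pvLookup summary "error_count") > 0) then "critical"
  else if issues.any (fun item => pvLookup item "level" == some "warning")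
          || decide (pvCount (pvLookup summary "warning_count") > 0) then "warning"
  else "passed"

-- ===== PORT B =====
def pvLevels : List String := ["passed", "warning", "critical"]

def pvTextRank : List (String × Nat) :=
  [("critical", 2), ("failed", 2), ("error", 2), ("warning", 1), ("passed", 0)]

-- _issue_rank(item)
def pvIssueRank (item : List (String × String)) : Nat :=
  let lv := pvLookup item "level"
  if lv == some "critical" then 2 else if lv == some "warning" then 1 else 0

def health_status_level_py_alt (raw_status : Option String) (issues : List (List (String × String))) (summary : List (String × String)) : String :=
  let text := PySem.Str.lower (PySem.Str.strip (raw_status.getD ""))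
  let sev :=
    match (pvTextRank.find? (fun p => p.1 == text)).map (·.2) with
    | some r => r
    | none =>
      let sev0 := (issues.map pvIssueRank).foldl Nat.max 0
      let sev1 := if sev0 < 2 && decide (pvCount (pvLookup summary "error_count") > 0) then 2 else sev0
      if sev1 < 1 && decide (pvCount (pvLookup summary "warning_count") > 0) then 1 else sev1
  pvLevels.getD sev ""

-- ===== PRECONDITION & SPEC =====
-- Pre_ excludes exactly the inputs where A (and B alike) raises ValueError: an evaluated
-- int(summary.get(...) or 0) whose non-empty string value does not parse as an int; the
-- conversions are short-circuited, so they only need to parse when their position is reached.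
def Pre_health_status_level_py (raw_status : Option String) (issues : List (List (String × String))) (summary : List (String × String)) : Prop :=
  let text := PySem.Str.lower (PySem.Str.strip (raw_status.getD ""))
  text = "critical" ∨ text = "failed" ∨ text = "error" ∨ text = "warning" ∨ text = "passed" ∨
  ((issues.any (fun item => pvLookup item "level" == some "critical") = true ∨
      pvCountOK (pvLookup summary "error_count") = true) ∧
   (issues.any (fun item => pvLookup item "level" == some "critical") = true ∨
      pvCount (pvLookup summary "error_count") > 0 ∨
      issues.any (fun item => pvLookup item "level" == some "warning") = true ∨
      pvCountOK (pvLookup summary "warning_count") = true))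
instance (raw_status : Option String) (issues : List (List (String × String))) (summary : List (String × String)) : Decidable (Pre_health_status_level_py raw_status issues summary) := by unfold Pre_health_status_level_py; infer_instance

def pvWitness_health_status_level_py : Option String × (List (List (String × String))) × (List (String × String)) :=
  (some "ok", [[("level", "warning")]], [("error_count", "2")])

def Spec_health_status_level_py (raw_status : Option String) (issues : List (List (String × String))) (summary : List (String × String)) (out : String) : Prop := out = health_status_level_py_alt raw_status issues summary
instance (raw_status : Option String) (issues : List (List (String × String))) (summary : List (String × String)) (out : String) : Decidable (Spec_health_status_level_py raw_status issues summary out) := by unfold Spec_health_status_level_py; infer_instance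

-- ===== CLAIM (what is proved, stated in full; the proofs are below) =====
def Claim_equal_health_status_level_py : Prop := ∀ (raw_status : Option String) (issues : List (List (String × String))) (summary : List (String × String)), Dom_health_status_level_py raw_status issues summary → Pre_health_status_level_py raw_status issues summary → Spec_health_status_level_py raw_status issues summary (health_status_level_py raw_status issues summary)

-- ===== LEMMAS AND PROOFS =====

-- B's max of issue ranks equals the 2/1/0 classification by A's two any(...) scans
theorem pv_maxrank_eq (issues : List (List (String × String))) (a : Nat) :
    (issues.map pvIssueRank).foldl Nat.max a
    = Nat.max a
        (if issues.any (fun item => pvLookup item "level" == some "critical") then 2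
         else if issues.any (fun item => pvLookup item "level" == some "warning") then 1
         else 0) := by
  induction issues generalizing a with
  | nil => simp
  | cons hd tl ih =>
    simp only [List.map_cons, List.foldl_cons, List.any_cons]
    rw [ih]
    by_cases hc : pvLookup hd "level" = some "critical"
    · simp only [pvIssueRank, hc]
      simp [Nat.max_def]
      split_ifs <;> omega
    · by_cases hw : pvLookup hd "level" = some "warning"
      · simp only [pvIssueRank, hw, beq_eq_false_iff_ne.mpr hc]
        simp [Nat.max_def]
        split_ifs <;> omega
      · simp [pvIssueRank, beq_eq_false_iff_ne.mpr hc, beq_eq_false_iff_ne.mpr hw]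

-- the text-rank lookup as an if-chain on text
theorem pv_textrank_eq (text : String) :
    (pvTextRank.find? (fun p => p.1 == text)).map (·.2)
    = if text = "critical" then some 2
      else if text = "failed" then some 2
      else if text = "error" then some 2
      else if text = "warning" then some 1
      else if text = "passed" then some 0
      else none := by
  by_cases h1 : text = "critical"
  · subst h1; simp [pvTextRank]
  · by_cases h2 : text = "failed"
    · subst h2; simp [pvTextRank]
    · by_cases h3 : text = "error"
      · subst h3; simp [pvTextRank]
      · by_cases h4 : text = "warning"
        · subst h4; simp [pvTextRank]
        · by_cases h5 : text = "passed"
          · subst h5; simp [pvTextRank]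
          · have c1 : ("critical" == text) = false := beq_eq_false_iff_ne.mpr (fun h => h1 h.symm)
            have c2 : ("failed" == text) = false := beq_eq_false_iff_ne.mpr (fun h => h2 h.symm)
            have c3 : ("error" == text) = false := beq_eq_false_iff_ne.mpr (fun h => h3 h.symm)
            have c4 : ("warning" == text) = false := beq_eq_false_iff_ne.mpr (fun h => h4 h.symm)
            have c5 : ("passed" == text) = false := beq_eq_false_iff_ne.mpr (fun h => h5 h.symm)
            simp [pvTextRank, List.find?, c1, c2, c3, c4, c5, h1, h2, h3, h4, h5]

-- the none-branch: B's arithmetic severity escalation equals A's boolean cascade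
theorem pv_body_eq (issues : List (List (String × String))) (summary : List (String × String)) :
    pvLevels.getD
      (let sev0 := (issues.map pvIssueRank).foldl Nat.max 0
       let sev1 := if sev0 < 2 && decide (pvCount (pvLookup summary "error_count") > 0) then 2 else sev0
       if sev1 < 1 && decide (pvCount (pvLookup summary "warning_count") > 0) then 1 else sev1) ""
    = if issues.any (fun item => pvLookup item "level" == some "critical")
          || decide (pvCount (pvLookup summary "error_count") > 0) then "critical"
      else if issues.any (fun item => pvLookup item "level" == some "warning")
          || decide (pvCount (pvLookup summary "warning_count") > 0) then "warning"
      else "passed" := by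
  simp only [pv_maxrank_eq]
  cases hc : issues.any (fun item => pvLookup item "level" == some "critical") <;>
    cases hw : issues.any (fun item => pvLookup item "level" == some "warning") <;>
    by_cases he : pvCount (pvLookup summary "error_count") > 0 <;>
    by_cases hv : pvCount (pvLookup summary "warning_count") > 0 <;>
    simp [he, hv, pvLevels]

-- ===== VERDICT (by name: the statement is the Claim_ definition above) =====
theorem health_status_level_py_spec : Claim_equal_health_status_level_py := by
  intro raw_status issues summary _ _
  unfold Spec_health_status_level_py health_status_level_py health_status_level_py_alt
  simp only [pv_textrank_eq]
  by_cases h1 : PySem.Str.lower (PySem.Str.strip (raw_status.getD "")) = "critical"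
  · simp [h1, pvLevels]
  by_cases h2 : PySem.Str.lower (PySem.Str.strip (raw_status.getD "")) = "failed"
  · simp [h2, pvLevels]
  by_cases h3 : PySem.Str.lower (PySem.Str.strip (raw_status.getD "")) = "error"
  · simp [h3, pvLevels]
  by_cases h4 : PySem.Str.lower (PySem.Str.strip (raw_status.getD "")) = "warning"
  · simp [h4, pvLevels]
  by_cases h5 : PySem.Str.lower (PySem.Str.strip (raw_status.getD "")) = "passed"
  · simp [h5, pvLevels]
  simp only [if_neg h1, if_neg h2, if_neg h3, if_neg h4, if_neg h5,
    if_neg (show ¬(PySem.Str.lower (PySem.Str.strip (raw_status.getD "")) = "critical" ∨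
        PySem.Str.lower (PySem.Str.strip (raw_status.getD "")) = "failed" ∨
        PySem.Str.lower (PySem.Str.strip (raw_status.getD "")) = "error") by simp [h1, h2, h3]),
    if_neg (show ¬(PySem.Str.lower (PySem.Str.strip (raw_status.getD "")) = "warning" ∨
        PySem.Str.lower (PySem.Str.strip (raw_status.getD "")) = "passed") by simp [h4, h5])]
  exact (pv_body_eq issues summary).symm
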